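-- pv_equiv track=rewrite | github.com/lishuo1999/Baekjoon | 프로그래머스/2/138476. 귤 고르기/귤 고르기.py | solution
-- ===== SOURCE A (Python) =====
-- def solution(k, tangerine):
--     answer = 0
--     tmp = 0
--     dic = {}
--     for i in range(len(tangerine)):
--         if tangerine[i] not in dic:
--             dic[tangerine[i]] = 1
--         else:
--             dic[tangerine[i]] += 1
--
--     #cnt 기준으로 내림차순 정렬 (value 기준으로 정렬)
--     dic = sorted(dic.items(), key=lambda x:x[1], reverse=True)
--     dic = dict(dic)
--     for key, value in dic.items():
--         tmp += value
--         answer += 1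
--         if tmp >= k:
--             break
--     return answer
-- ===== SOURCE B (Python) =====
-- def solution(k, tangerine):
--     # Count each size, then bucket the frequencies (each frequency is in 1..n)
--     # and walk the buckets from the largest frequency down, instead of
--     # comparison-sorting the frequency table.
--     freq = {}
--     for t in tangerine:
--         freq[t] = freq.get(t, 0) + 1
--     buckets = {}
--     for c in freq.values():
--         buckets[c] = buckets.get(c, 0) + 1
--     answer = 0
--     remaining = k
--     for c in range(len(tangerine), 0, -1):
--         for _ in range(buckets.get(c, 0)):
--             answer += 1
--             remaining -= c
--             if remaining <= 0:
--                 return answer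
--     return answer
-- ===== Notes on version B (the rewrite author's own statement) =====
-- stated objective: alternative
-- what changed: B replaces A's comparison sort of the frequency table by a bucket/counting-sort walk: it counts how many kinds have each frequency and scans the possible frequencies n..1 from the top, so no sort is performed.
import Mathlib
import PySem

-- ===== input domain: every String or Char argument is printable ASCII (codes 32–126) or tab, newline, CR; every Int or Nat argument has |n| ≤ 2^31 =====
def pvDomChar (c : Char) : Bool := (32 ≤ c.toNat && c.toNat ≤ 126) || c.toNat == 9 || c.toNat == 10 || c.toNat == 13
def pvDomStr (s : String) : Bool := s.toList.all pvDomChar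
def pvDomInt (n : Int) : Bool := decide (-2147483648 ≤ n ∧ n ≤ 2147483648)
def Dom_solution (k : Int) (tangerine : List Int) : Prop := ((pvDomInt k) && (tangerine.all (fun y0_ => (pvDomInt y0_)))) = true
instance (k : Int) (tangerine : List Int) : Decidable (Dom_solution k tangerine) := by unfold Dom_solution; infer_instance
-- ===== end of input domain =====

-- B replaces A's comparison sort of the frequency table by a bucket walk over the
-- possible frequencies (1..n) taken from largest to smallest (objective: alternative).

-- ===== PORT A =====
-- 'for key, value in dic.items(): tmp += value; answer += 1; if tmp >= k: break'
def solLoopA (k : Int) : Int → Int → List (Int × Int) → Int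
  | _, answer, [] => answer
  | tmp, answer, (_, value) :: rest =>
    let tmp := tmp + value
    let answer := answer + 1
    if k ≤ tmp then answer else solLoopA k tmp answer rest

def solution (k : Int) (tangerine : List Int) : Int :=
  -- first loop: tangerine[i] is always in range, so pyGetD's default is never used
  let dic : PySem.Dict Int Int :=
    (PySem.List.pyRange 0 (tangerine.length : Int)).foldl
      (fun d i =>
        let x := PySem.List.pyGetD tangerine i 0
        if d.contains x = false then d.insert x 1 else d.insert x (d.getD x 0 + 1))
      PySem.Dict.empty
  let sortedItems := PySem.List.sorted dic.items (fun p => p.2) true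
  let dic2 := PySem.Dict.ofList sortedItems
  solLoopA k 0 0 dic2.items

-- ===== PORT B =====
-- inner 'for _ in range(buckets.get(c, 0)): …' — Sum.inr = early return, Sum.inl = updated state
def bInner (c : Int) : Nat → Int → Int → (Int × Int) ⊕ Int
  | 0, answer, remaining => Sum.inl (answer, remaining)
  | m + 1, answer, remaining =>
    let answer := answer + 1
    let remaining := remaining - c
    if remaining ≤ 0 then Sum.inr answer else bInner c m answer remaining

-- outer 'for c in range(len(tangerine), 0, -1): …'
def bOuter (buckets : PySem.Dict Int Int) : List Int → Int → Int → Int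
  | [], answer, _ => answer
  | c :: cs, answer, remaining =>
    match bInner c (buckets.getD c 0).toNat answer remaining with
    | Sum.inr ans => ans
    | Sum.inl (a, r) => bOuter buckets cs a r

def solution_alt (k : Int) (tangerine : List Int) : Int :=
  let freq : PySem.Dict Int Int :=
    tangerine.foldl (fun d t => d.insert t (d.getD t 0 + 1)) PySem.Dict.empty
  let buckets : PySem.Dict Int Int :=
    freq.values.foldl (fun d c => d.insert c (d.getD c 0 + 1)) PySem.Dict.empty
  bOuter buckets (PySem.List.pyRange (tangerine.length : Int) 0 (-1)) 0 k

-- ===== PRECONDITION & SPEC =====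
def Spec_solution (k : Int) (tangerine : List Int) (out : Int) : Prop := out = solution_alt k tangerine
instance (k : Int) (tangerine : List Int) (out : Int) : Decidable (Spec_solution k tangerine out) := by unfold Spec_solution; infer_instance

-- ===== CLAIM (what is proved, stated in full; the proofs are below) =====
def Claim_equal_solution : Prop := ∀ (k : Int) (tangerine : List Int), Dom_solution k tangerine → Spec_solution k tangerine (solution k tangerine)

-- ===== LEMMAS AND PROOFS =====

-- the common early-exit accumulation loop, over the bare list of frequency values
def vloop (k : Int) : List Int → Int → Int → Int
  | [], _, ans => ans
  | v :: vs, tmp, ans => if k ≤ tmp + v then ans + 1 else vloop k vs (tmp + v) (ans + 1)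

theorem solLoopA_eq_vloop (k : Int) (l : List (Int × Int)) :
    ∀ tmp ans, solLoopA k tmp ans l = vloop k (l.map (·.2)) tmp ans := by
  induction l with
  | nil => intro tmp ans; rfl
  | cons p rest ih =>
    intro tmp ans
    obtain ⟨x, v⟩ := p
    simp only [solLoopA, List.map, vloop]
    split <;> simp [ih]

theorem bInner_eq_vloop (k c : Int) (m : Nat) :
    ∀ a r (vs : List Int),
      vloop k (List.replicate m c ++ vs) (k - r) a =
        (match bInner c m a r with
          | Sum.inr ans => ans
          | Sum.inl (a', r') => vloop k vs (k - r') a') := by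
  induction m with
  | zero => intro a r vs; simp [bInner]
  | succ m ih =>
    intro a r vs
    simp only [List.replicate, List.cons_append, vloop, bInner]
    have hc : (k ≤ k - r + c) ↔ (r - c ≤ 0) := by omega
    by_cases h : r - c ≤ 0
    · rw [if_pos (hc.mpr h), if_pos h]
    · rw [if_neg (fun hh => h (hc.mp hh)), if_neg h]
      have := ih (a + 1) (r - c) vs
      simpa [show k - (r - c) = k - r + c by ring] using this

theorem bOuter_eq_vloop (buckets : PySem.Dict Int Int) (k : Int) (cs : List Int) :
    ∀ a r, bOuter buckets cs a r =
      vloop k (cs.flatMap (fun c => List.replicate (buckets.getD c 0).toNat c)) (k - r) a := by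
  induction cs with
  | nil => intro a r; rfl
  | cons c cs ih =>
    intro a r
    simp only [bOuter, List.flatMap_cons]
    rw [bInner_eq_vloop k c]
    cases h : bInner c (buckets.getD c 0).toNat a r with
    | inr ans => rfl
    | inl p => obtain ⟨a', r'⟩ := p; exact ih a' r'

-- counting a value in a flatMap of replicates indexed by a Nodup list
theorem count_flatMap_replicate (v : Int) (m : Int → Nat) :
    ∀ (cs : List Int), cs.Nodup →
      (cs.flatMap (fun c => List.replicate (m c) c)).count v = if v ∈ cs then m v else 0 := by
  intro cs
  induction cs with
  | nil => intro _; simp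
  | cons c cs ih =>
    intro hnd
    rw [List.nodup_cons] at hnd
    rw [List.flatMap_cons, List.count_append, ih hnd.2, List.count_replicate]
    by_cases hvc : v = c
    · subst hvc
      simp [hnd.1]
    · simp [List.mem_cons, hvc, Ne.symm hvc]

-- A's first loop builds Counter(tangerine)
theorem dicA_eq_counter (tangerine : List Int) :
    (PySem.List.pyRange 0 (tangerine.length : Int)).foldl
      (fun d i =>
        let x := PySem.List.pyGetD tangerine i 0
        if d.contains x = false then d.insert x 1 else d.insert x (d.getD x 0 + 1))
      PySem.Dict.empty = PySem.Dict.counter tangerine := by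
  refine Eq.trans (PySem.List.foldl_pyRange_zero_pyGetD' tangerine 0
      (fun (d : PySem.Dict Int Int) (x : Int) =>
        if d.contains x = false then d.insert x 1 else d.insert x (d.getD x 0 + 1))
      PySem.Dict.empty) ?_
  rw [← PySem.Dict.foldl_insert_getD_add_one_eq_counter]
  congr 1
  funext d x
  by_cases h : d.contains x = false
  · rw [if_pos h, PySem.Dict.getD_of_not_contains d 0 h]; norm_num
  · rw [if_neg h]

-- dict(pairs) with Nodup keys keeps exactly those pairs, in order
theorem ofList_items_of_nodup (ps : List (Int × Int)) (h : (ps.map (·.1)).Nodup) :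
    (PySem.Dict.ofList ps).items = ps := by
  have : PySem.Dict.ofList ps = ps.foldl (fun d p => d.insert p.1 p.2) PySem.Dict.empty := rfl
  rw [this,
    PySem.Dict.items_foldl_insert_fresh ps (fun p => p.1) (fun p => p.2) PySem.Dict.empty
      (fun a _ => PySem.Dict.contains_empty a.1) h]
  simp [show (PySem.Dict.empty : PySem.Dict Int Int).items = [] from rfl]

-- the two descending frequency sequences coincide
theorem seq_eq (tangerine : List Int) :
    (PySem.List.sorted (PySem.Dict.counter tangerine).items (fun p => p.2) true).map (·.2) =
      (PySem.List.pyRange (tangerine.length : Int) 0 (-1)).flatMap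
        (fun c => List.replicate ((PySem.Dict.counter
            (PySem.Dict.counter tangerine).values).getD c 0).toNat c) := by
  set items := (PySem.Dict.counter tangerine).items with hitems
  set L1 := (PySem.List.sorted items (fun p => p.2) true).map (·.2) with hL1
  set vals := (PySem.Dict.counter tangerine).values with hvals
  have hvals' : vals = items.map (·.2) := rfl
  -- bucket sizes are the multiplicities in vals
  have hbs : ∀ c : Int, ((PySem.Dict.counter vals).getD c 0).toNat = vals.count c := by
    intro c; rw [PySem.Dict.getD_counter]; exact Int.toNat_natCast _
  set L2 := (PySem.List.pyRange (tangerine.length : Int) 0 (-1)).flatMap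
      (fun c => List.replicate ((PySem.Dict.counter vals).getD c 0).toNat c) with hL2
  -- every element of vals is a positive count bounded by the length
  have hmem : ∀ v ∈ vals, 0 < v ∧ v ≤ (tangerine.length : Int) := by
    intro v hv
    rw [hvals', hitems, PySem.Dict.items_counter] at hv
    simp only [List.map_map, List.mem_map, Function.comp] at hv
    obtain ⟨x, hx, rfl⟩ := hv
    have hx' : x ∈ tangerine := (PySem.Set.mem_ofList _ _).mp hx
    constructor
    · exact_mod_cast List.count_pos_iff.mpr hx'
    · exact_mod_cast List.count_le_length
  -- L1 is a permutation of vals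
  have hp1 : L1.Perm vals := by
    rw [hL1, hvals']
    exact (PySem.List.sorted_perm items (fun p => p.2) true).map (·.2)
  -- L2 is a permutation of vals (count argument)
  have hp2 : L2.Perm vals := by
    rw [List.perm_iff_count]
    intro v
    rw [hL2]
    have hnd : (PySem.List.pyRange (tangerine.length : Int) 0 (-1)).Nodup := by
      rw [PySem.List.pyRange_neg_one_eq_reverse, List.nodup_reverse]
      exact PySem.List.nodup_pyRange_one _ _
    rw [count_flatMap_replicate v _ _ hnd]
    by_cases hv : v ∈ PySem.List.pyRange (tangerine.length : Int) 0 (-1)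
    · rw [if_pos hv, hbs]
    · rw [if_neg hv]
      rw [PySem.List.mem_pyRange_neg_one] at hv
      push Not at hv
      by_contra hne
      have hcv : v ∈ vals := List.count_pos_iff.mp (Nat.pos_of_ne_zero (fun h => hne h.symm))
      have := hmem v hcv
      omega
  -- both are sorted descending
  have hs1 : L1.Pairwise (fun a b => b ≤ a) := by
    rw [hL1]
    exact List.Pairwise.map _ (fun a b h => h)
      (PySem.List.sorted_pairwise_rev items (fun p => p.2))
  have hs2 : L2.Pairwise (fun a b => b ≤ a) := by
    rw [hL2, List.pairwise_flatMap]
    constructor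
    · intro c _
      exact List.pairwise_replicate.mpr (Or.inr le_rfl)
    · have hgt : (PySem.List.pyRange (tangerine.length : Int) 0 (-1)).Pairwise (· > ·) := by
        rw [PySem.List.pyRange_neg_one_eq_reverse, List.pairwise_reverse]
        exact PySem.List.pairwise_lt_pyRange_one _ _
      refine hgt.imp_of_mem ?_
      intro c1 c2 _ _ h x hx y hy
      rw [List.eq_of_mem_replicate hx, List.eq_of_mem_replicate hy]
      exact le_of_lt h
  exact (List.Perm.eq_of_pairwise
    (fun a b _ _ h1 h2 => le_antisymm h2 h1) hs1 hs2 (hp1.trans hp2.symm))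

-- ===== VERDICT (by name: the statement is the Claim_ definition above) =====
theorem solution_spec : Claim_equal_solution := by
  intro k tangerine _
  unfold Spec_solution solution solution_alt
  simp only []
  rw [dicA_eq_counter]
  rw [solLoopA_eq_vloop]
  rw [ofList_items_of_nodup]
  · -- main equality via the common vloop
    rw [PySem.Dict.foldl_insert_getD_add_one_eq_counter]
    rw [bOuter_eq_vloop _ k]
    rw [PySem.Dict.foldl_insert_getD_add_one_eq_counter]
    rw [seq_eq tangerine]
    norm_num
  · -- keys of the sorted items are Nodup
    have hperm : (PySem.List.sorted (PySem.Dict.counter tangerine).items (fun p => p.2) true).Perm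
        (PySem.Dict.counter tangerine).items := PySem.List.sorted_perm _ _ _
    have : ((PySem.Dict.counter tangerine).items.map (·.1)).Nodup := by
      have := PySem.Dict.nodup_keys_counter tangerine
      exact this
    exact ((hperm.map (·.1)).nodup_iff).mpr this
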